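-- pv_equiv track=rewrite | github.com/RamySaleh/Algorithms | Interview_fb/Fair_indices.py | getFairIndices
-- ===== SOURCE A (Python) =====
-- from typing import List
--
-- def getFairIndices(A: List[str], B: List[str]) -> int:
--     res = []
--     sum_after_a = sum(A)
--     sum_before_a = 0
--     sum_after_b = sum(B)
--     sum_before_b = 0
--
--     for i in range(1, len(A)):
--         # sum before : 0 -> k - 1
--         # sum after : k -> n - 1
--         sum_before_a += A[i - 1]
--         sum_after_a -= A[i - 1]
--
--         sum_before_b += B[i - 1]
--         sum_after_b -= B[i - 1]
--
--         if sum_before_a == sum_after_a == sum_before_b == sum_after_b: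
--             res.append(i)
--     return res
-- ===== SOURCE B (Python) =====
-- from typing import List
--
-- def getFairIndices(A: List[str], B: List[str]) -> int:
--     ta = sum(A)
--     tb = sum(B)
--     pa = []
--     s = 0
--     for x in A:
--         s += x
--         pa.append(s)
--     pb = []
--     s = 0
--     for x in B:
--         s += x
--         pb.append(s)
--     return [i for i in range(1, len(A))
--             if 2 * pa[i - 1] == ta and pa[i - 1] == pb[i - 1] and 2 * pb[i - 1] == tb]
-- ===== Notes on version B (the rewrite author's own statement) =====
-- stated objective: alternative
-- what changed: A carries four running before/after sums and tests a chained equality inside one loop; B precomputes the totals and prefix-sum tables of A and B in separate passes and selects indices with the doubling test 2*prefix == total.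
-- outside the precondition, e.g. on getFairIndices([1, 1], []): A raises IndexError, B raises IndexError; on getFairIndices([1, 2], []): A raises IndexError, B returns []
import Mathlib
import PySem

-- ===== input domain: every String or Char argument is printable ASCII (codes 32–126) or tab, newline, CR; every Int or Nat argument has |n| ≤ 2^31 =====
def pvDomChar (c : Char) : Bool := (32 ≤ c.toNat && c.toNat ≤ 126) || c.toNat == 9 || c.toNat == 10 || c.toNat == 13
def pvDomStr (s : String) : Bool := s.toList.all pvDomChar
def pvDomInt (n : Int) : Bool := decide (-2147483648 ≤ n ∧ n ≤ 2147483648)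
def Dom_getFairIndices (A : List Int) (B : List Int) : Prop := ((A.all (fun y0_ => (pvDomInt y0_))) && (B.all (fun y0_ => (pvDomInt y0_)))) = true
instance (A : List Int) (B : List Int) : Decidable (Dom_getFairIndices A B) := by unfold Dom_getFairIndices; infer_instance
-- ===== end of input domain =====

-- B replaces A's four running sums by precomputed totals and prefix-sum tables with the
-- doubling test 2*prefix == total (objective: alternative decomposition, same cost).

-- ===== PORT A =====
-- A's loop over range(1, len(A)) carrying (res, sum_before_a, sum_after_a, sum_before_b, sum_after_b).
-- B[i-1] raises IndexError when len(B) < len(A) - 1; Pre_ excludes that, so pyGetD's default is never read.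
def getFairIndices (A : List Int) (B : List Int) : List Int :=
  ((PySem.List.pyRange 1 (PySem.List.len A) 1).foldl
    (fun (st : List Int × Int × Int × Int × Int) i =>
      match st with
      | (res, sba, saa, sbb, sab) =>
        let a := PySem.List.pyGetD A (i - 1) 0
        let b := PySem.List.pyGetD B (i - 1) 0
        let sba := sba + a
        let saa := saa - a
        let sbb := sbb + b
        let sab := sab - b
        if sba = saa ∧ saa = sbb ∧ sbb = sab then (res ++ [i], sba, saa, sbb, sab)
        else (res, sba, saa, sbb, sab))
    ([], 0, A.sum, 0, B.sum)).1

-- ===== PORT B =====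
-- Source B's prefix-sum loop: append the running sum for each element.
def pvPrefixes (l : List Int) : List Int :=
  (l.foldl (fun (st : List Int × Int) x => (st.1 ++ [st.2 + x], st.2 + x)) (([] : List Int), 0)).1

def getFairIndices_alt (A : List Int) (B : List Int) : List Int :=
  let ta := A.sum
  let tb := B.sum
  let pa := pvPrefixes A
  let pb := pvPrefixes B
  (PySem.List.pyRange 1 (PySem.List.len A) 1).filter
    (fun i => (2 * PySem.List.pyGetD pa (i - 1) 0 == ta)
           && (PySem.List.pyGetD pa (i - 1) 0 == PySem.List.pyGetD pb (i - 1) 0)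
           && (2 * PySem.List.pyGetD pb (i - 1) 0 == tb))

-- ===== PRECONDITION & SPEC =====
-- Pre_ excludes len(B) < len(A) - 1, where A raises IndexError at B[i-1].
def Pre_getFairIndices (A : List Int) (B : List Int) : Prop := A.length ≤ B.length + 1
instance (A : List Int) (B : List Int) : Decidable (Pre_getFairIndices A B) := by unfold Pre_getFairIndices; infer_instance
def pvWitness_getFairIndices : List Int × List Int := ([1, 2, 3, 3, 2, 1], [1, 2, 3, 3, 2, 1])

def Spec_getFairIndices (A : List Int) (B : List Int) (out : List Int) : Prop := out = getFairIndices_alt A B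
instance (A : List Int) (B : List Int) (out : List Int) : Decidable (Spec_getFairIndices A B out) := by unfold Spec_getFairIndices; infer_instance

-- ===== CLAIM (what is proved, stated in full; the proofs are below) =====
def Claim_equal_getFairIndices : Prop := ∀ (A : List Int) (B : List Int), Dom_getFairIndices A B → Pre_getFairIndices A B → Spec_getFairIndices A B (getFairIndices A B)

-- ===== LEMMAS AND PROOFS =====

-- sum of the first k elements
def pvPsum (l : List Int) (k : Nat) : Int := (l.take k).sum

lemma pvPsum_succ (l : List Int) (k : Nat) (hk : k < l.length) :
    pvPsum l (k + 1) = pvPsum l k + l[k] := by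
  unfold pvPsum
  rw [List.take_add_one, List.sum_append, List.getElem?_eq_getElem hk]
  simp

lemma pvPrefixes_foldl (l : List Int) : ∀ (acc : List Int) (s : Int),
    l.foldl (fun (st : List Int × Int) x => (st.1 ++ [st.2 + x], st.2 + x)) (acc, s)
      = (acc ++ (List.range l.length).map (fun k => s + pvPsum l (k + 1)), s + l.sum) := by
  induction l with
  | nil => intro acc s; simp [pvPsum]
  | cons x xs ih =>
      intro acc s
      simp only [List.foldl_cons, ih, List.length_cons, List.range_succ_eq_map, List.map_cons,
        List.map_map]
      congr 1
      · have h0 : pvPsum (x :: xs) (0 + 1) = x := by simp [pvPsum]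
        have hstep : ((fun k => s + pvPsum (x :: xs) (k + 1)) ∘ Nat.succ)
            = fun k => s + x + pvPsum xs (k + 1) := by
          funext k; simp [pvPsum]; ring
        rw [h0, hstep]
        simp
      · simp; ring

lemma pvPrefixes_getD (l : List Int) (k : Nat) (hk : k < l.length) :
    (pvPrefixes l).getD k 0 = pvPsum l (k + 1) := by
  unfold pvPrefixes
  rw [pvPrefixes_foldl]
  simp [List.getD_eq_getElem?_getD, hk]

-- the loop invariant: with the four sums set to the prefix/suffix sums at a - 1,
-- the rest of A's loop appends exactly B's filtered indices
lemma pvLoop_eq (A B : List Int) (hB : A.length ≤ B.length + 1) :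
    ∀ (m : Nat) (a : Int) (res : List Int), 1 ≤ a → a + m = (A.length : Int) →
    ((PySem.List.pyRange a (PySem.List.len A) 1).foldl
      (fun (st : List Int × Int × Int × Int × Int) i =>
        match st with
        | (res, sba, saa, sbb, sab) =>
          let x := PySem.List.pyGetD A (i - 1) 0
          let y := PySem.List.pyGetD B (i - 1) 0
          let sba := sba + x
          let saa := saa - x
          let sbb := sbb + y
          let sab := sab - y
          if sba = saa ∧ saa = sbb ∧ sbb = sab then (res ++ [i], sba, saa, sbb, sab)
          else (res, sba, saa, sbb, sab))
      (res, pvPsum A (a - 1).toNat, A.sum - pvPsum A (a - 1).toNat,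
            pvPsum B (a - 1).toNat, B.sum - pvPsum B (a - 1).toNat)).1
    = res ++ (PySem.List.pyRange a (PySem.List.len A) 1).filter
        (fun i => (2 * PySem.List.pyGetD (pvPrefixes A) (i - 1) 0 == A.sum)
               && (PySem.List.pyGetD (pvPrefixes A) (i - 1) 0 == PySem.List.pyGetD (pvPrefixes B) (i - 1) 0)
               && (2 * PySem.List.pyGetD (pvPrefixes B) (i - 1) 0 == B.sum)) := by
  intro m
  induction m with
  | zero =>
      intro a res ha hlen
      rw [PySem.List.pyRange_one_eq_nil (by rw [PySem.List.len_eq]; omega)]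
      simp
  | succ m ih =>
      intro a res ha hlen
      have haA : a < (A.length : Int) := by omega
      rw [PySem.List.pyRange_one_cons (by rw [PySem.List.len_eq] at *; omega)]
      -- index facts
      have h1 : 0 ≤ a - 1 := by omega
      have hkA : (a - 1).toNat < A.length := by omega
      have hkB : (a - 1).toNat < B.length := by omega
      have hxA : PySem.List.pyGetD A (a - 1) 0 = A[(a - 1).toNat] :=
        PySem.List.pyGetD_eq_getElem A 0 h1 (by omega)
      have hxB : PySem.List.pyGetD B (a - 1) 0 = B[(a - 1).toNat] :=
        PySem.List.pyGetD_eq_getElem B 0 h1 (by omega)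
      have htoNat : (a - 1).toNat + 1 = a.toNat := by omega
      have hsA : pvPsum A (a - 1).toNat + A[(a - 1).toNat] = pvPsum A a.toNat := by
        rw [← htoNat, pvPsum_succ A _ hkA]
      have hsB : pvPsum B (a - 1).toNat + B[(a - 1).toNat] = pvPsum B a.toNat := by
        rw [← htoNat, pvPsum_succ B _ hkB]
      -- prefix-table lookups at index a - 1
      have hpA : PySem.List.pyGetD (pvPrefixes A) (a - 1) 0 = pvPsum A a.toNat := by
        rw [PySem.List.pyGetD_of_nonneg _ _ h1, pvPrefixes_getD A _ hkA, htoNat]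
      have hpB : PySem.List.pyGetD (pvPrefixes B) (a - 1) 0 = pvPsum B a.toNat := by
        rw [PySem.List.pyGetD_of_nonneg _ _ h1, pvPrefixes_getD B _ hkB, htoNat]
      -- condition equivalence at i = a
      have hcond : (pvPsum A (a - 1).toNat + PySem.List.pyGetD A (a - 1) 0
              = A.sum - pvPsum A (a - 1).toNat - PySem.List.pyGetD A (a - 1) 0
            ∧ A.sum - pvPsum A (a - 1).toNat - PySem.List.pyGetD A (a - 1) 0
              = pvPsum B (a - 1).toNat + PySem.List.pyGetD B (a - 1) 0
            ∧ pvPsum B (a - 1).toNat + PySem.List.pyGetD B (a - 1) 0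
              = B.sum - pvPsum B (a - 1).toNat - PySem.List.pyGetD B (a - 1) 0)
          ↔ ((2 * PySem.List.pyGetD (pvPrefixes A) (a - 1) 0 == A.sum)
               && (PySem.List.pyGetD (pvPrefixes A) (a - 1) 0 == PySem.List.pyGetD (pvPrefixes B) (a - 1) 0)
               && (2 * PySem.List.pyGetD (pvPrefixes B) (a - 1) 0 == B.sum)) = true := by
        rw [hxA, hxB, hpA, hpB]
        simp only [Bool.and_eq_true, beq_iff_eq]
        constructor
        · rintro ⟨e1, e2, e3⟩; omega
        · rintro ⟨⟨e1, e2⟩, e3⟩; omega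
      have htail : a + 1 + (m : Int) = (A.length : Int) := by omega
      have hstate : pvPsum A a.toNat = pvPsum A ((a + 1) - 1).toNat ∧
                    pvPsum B a.toNat = pvPsum B ((a + 1) - 1).toNat := by
        constructor <;> congr 1 <;> omega
      simp only [List.foldl_cons, List.filter_cons]
      by_cases hc : (pvPsum A (a - 1).toNat + PySem.List.pyGetD A (a - 1) 0
              = A.sum - pvPsum A (a - 1).toNat - PySem.List.pyGetD A (a - 1) 0
            ∧ A.sum - pvPsum A (a - 1).toNat - PySem.List.pyGetD A (a - 1) 0
              = pvPsum B (a - 1).toNat + PySem.List.pyGetD B (a - 1) 0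
            ∧ pvPsum B (a - 1).toNat + PySem.List.pyGetD B (a - 1) 0
              = B.sum - pvPsum B (a - 1).toNat - PySem.List.pyGetD B (a - 1) 0)
      · rw [if_pos hc, hcond.mp hc]
        have hrec := ih (a + 1) (res ++ [a]) (by omega) htail
        rw [← hstate.1, ← hstate.2] at hrec
        rw [hxA, hxB, sub_sub, sub_sub, hsA, hsB]
        simpa [List.append_assoc] using hrec
      · rw [if_neg hc]
        have hcf : ¬ (((2 * PySem.List.pyGetD (pvPrefixes A) (a - 1) 0 == A.sum)
               && (PySem.List.pyGetD (pvPrefixes A) (a - 1) 0 == PySem.List.pyGetD (pvPrefixes B) (a - 1) 0)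
               && (2 * PySem.List.pyGetD (pvPrefixes B) (a - 1) 0 == B.sum)) = true) := by
          rw [← hcond]; exact hc
        simp only [Bool.not_eq_true] at hcf
        rw [hcf]
        have hrec := ih (a + 1) res (by omega) htail
        rw [← hstate.1, ← hstate.2] at hrec
        rw [hxA, hxB, sub_sub, sub_sub, hsA, hsB]
        exact hrec

-- ===== VERDICT (by name: the statement is the Claim_ definition above) =====
theorem getFairIndices_spec : Claim_equal_getFairIndices := by
  intro A B _ hPre
  unfold Spec_getFairIndices getFairIndices getFairIndices_alt
  by_cases hA : A.length = 0
  · rw [PySem.List.pyRange_one_eq_nil (by simp [PySem.List.len, hA])]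
    simp
  · have := pvLoop_eq A B hPre (A.length - 1) 1 [] (by omega) (by omega)
    simpa [pvPsum] using this
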